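-- pv_equiv track=rewrite | github.com/snikehero/WorkPlatform | backend/api.py | _normalize_consecutive_4
-- ===== SOURCE A (Python) =====
-- def _normalize_upper(value: str) -> str:
--     return (value or "").strip().upper()
--
-- def _normalize_consecutive_4(value: str) -> str:
--     source = _normalize_upper(value)
--     if source.startswith("TDC-"):
--         source = source[4:]
--     digits = "".join(ch for ch in source if ch.isdigit())
--     if not digits:
--         return "0000"
--     return digits.zfill(4)[-4:]
-- ===== SOURCE B (Python) =====
-- def _normalize_consecutive_4(value: str) -> str:
--     # Scan from the right, collecting at most the last 4 digit characters;
--     # case-folding, strip() and the "TDC-" prefix contain no digits, so they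
--     # can be skipped entirely.
--     buf = []
--     for ch in reversed(value or ""):
--         if ch.isdigit():
--             buf.append(ch)
--             if len(buf) == 4:
--                 break
--     if not buf:
--         return "0000"
--     return "".join(reversed(buf)).zfill(4)
-- ===== Notes on version B (the rewrite author's own statement) =====
-- stated objective: alternative
-- what changed: B drops the strip/upper/TDC-prefix normalization (none of which can add or remove digit characters) and scans the raw string from the right, collecting at most 4 digits with early exit, instead of filtering the whole normalized string and slicing its zfill.
import Mathlib
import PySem

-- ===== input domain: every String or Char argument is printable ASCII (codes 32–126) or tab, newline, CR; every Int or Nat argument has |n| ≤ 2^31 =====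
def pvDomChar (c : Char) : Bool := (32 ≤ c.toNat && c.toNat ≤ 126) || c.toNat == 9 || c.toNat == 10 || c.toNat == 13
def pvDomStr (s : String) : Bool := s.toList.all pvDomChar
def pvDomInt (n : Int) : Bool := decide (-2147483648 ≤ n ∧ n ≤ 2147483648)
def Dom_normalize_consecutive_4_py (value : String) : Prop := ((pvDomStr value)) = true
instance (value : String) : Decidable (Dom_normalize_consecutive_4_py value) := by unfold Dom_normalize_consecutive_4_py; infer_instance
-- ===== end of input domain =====

-- B scans the string from the right collecting at most the last 4 digits; A normalizes
-- (strip/upper/TDC- prefix) then filters all digits and slices the zfill. Equal on all inputs.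

-- ===== PORT A =====
def normalize_upper_py (value : String) : String :=
  PySem.Str.upper (PySem.Str.strip value)

def normalize_consecutive_4_py (value : String) : String :=
  let source := normalize_upper_py value
  let source := if PySem.Str.startswith source "TDC-" then PySem.Str.slice source (some 4) none else source
  let digits := String.ofList (source.toList.filter PySem.Chars.isdigit)
  if digits.toList = [] then "0000"
  else PySem.Str.slice (PySem.Str.zfill digits 4) (some (-4)) none

-- ===== PORT B =====
-- the for-loop over reversed(value) with early break at 4 collected digits
def pvAltLoop : List Char → List Char → List Char
  | [], buf => buf
  | c :: rest, buf =>
    if PySem.Chars.isdigit c then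
      let buf' := buf ++ [c]
      if buf'.length = 4 then buf' else pvAltLoop rest buf'
    else pvAltLoop rest buf

def normalize_consecutive_4_py_alt (value : String) : String :=
  let buf := pvAltLoop value.toList.reverse []
  if buf = [] then "0000"
  else PySem.Str.zfill (String.ofList buf.reverse) 4

-- ===== PRECONDITION & SPEC =====
def Spec_normalize_consecutive_4_py (value : String) (out : String) : Prop := out = normalize_consecutive_4_py_alt value
instance (value : String) (out : String) : Decidable (Spec_normalize_consecutive_4_py value out) := by unfold Spec_normalize_consecutive_4_py; infer_instance

-- ===== CLAIM (what is proved, stated in full; the proofs are below) =====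
def Claim_equal_normalize_consecutive_4_py : Prop := ∀ (value : String), Dom_normalize_consecutive_4_py value → Spec_normalize_consecutive_4_py value (normalize_consecutive_4_py value)

-- ===== LEMMAS AND PROOFS =====

theorem pvCharLe (a b : Char) : (a ≤ b) ↔ a.toNat ≤ b.toNat := by
  rw [Char.le_def, UInt32.le_iff_toNat_le]
  exact Iff.rfl

theorem pvIsdigitIff (c : Char) :
    PySem.Chars.isdigit c = true ↔ 48 ≤ c.toNat ∧ c.toNat ≤ 57 := by
  unfold PySem.Chars.isdigit
  simp [pvCharLe]

theorem pvIslowerIff (c : Char) :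
    PySem.Chars.islower c = true ↔ 97 ≤ c.toNat ∧ c.toNat ≤ 122 := by
  unfold PySem.Chars.islower
  simp [pvCharLe]

theorem pvUpperChar_isdigit (c : Char) :
    PySem.Chars.isdigit (PySem.Chars.upperChar c) = PySem.Chars.isdigit c := by
  unfold PySem.Chars.upperChar
  split
  · next h =>
    rw [pvIslowerIff] at h
    have hv : Nat.isValidChar (c.toNat - 32) := Or.inl (by omega)
    have ht : (Char.ofNat (c.toNat - 32)).toNat = c.toNat - 32 := by
      rw [Char.toNat_ofNat]; simp [hv]
    have h1 : PySem.Chars.isdigit (Char.ofNat (c.toNat - 32)) = false := by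
      rw [Bool.eq_false_iff]; intro hc; rw [pvIsdigitIff, ht] at hc; omega
    have h2 : PySem.Chars.isdigit c = false := by
      rw [Bool.eq_false_iff]; intro hc; rw [pvIsdigitIff] at hc; omega
    rw [h1, h2]
  · rfl

theorem pvUpperChar_of_isdigit (c : Char) (h : PySem.Chars.isdigit c = true) :
    PySem.Chars.upperChar c = c := by
  unfold PySem.Chars.upperChar
  rw [pvIsdigitIff] at h
  split
  · next hl => rw [pvIslowerIff] at hl; omega
  · rfl

theorem pvFilter_upper (l : List Char) :
    List.filter PySem.Chars.isdigit (PySem.Chars.upper l)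
      = List.filter PySem.Chars.isdigit l := by
  unfold PySem.Chars.upper
  induction l with
  | nil => rfl
  | cons c l ih =>
    simp only [List.map_cons, List.filter_cons, pvUpperChar_isdigit]
    by_cases h : PySem.Chars.isdigit c = true
    · simp [h, pvUpperChar_of_isdigit c h, ih]
    · simp [h, ih]

theorem pvFilter_dropWhile (p q : Char → Bool)
    (hpq : ∀ c, q c = true → p c = false) (l : List Char) :
    List.filter p (List.dropWhile q l) = List.filter p l := by
  induction l with
  | nil => rfl
  | cons c l ih =>
    by_cases h : q c = true
    · simp [h, ih, hpq c h]
    · simp [h]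

theorem pvIsdigit_of_isspace (c : Char) (h : PySem.Chars.isspace c = true) :
    PySem.Chars.isdigit c = false := by
  unfold PySem.Chars.isspace at h
  rw [Bool.eq_false_iff]; intro hc
  rw [pvIsdigitIff] at hc
  simp only [Bool.or_eq_true, Bool.and_eq_true, decide_eq_true_eq] at h
  omega

theorem pvFilter_strip (l : List Char) :
    List.filter PySem.Chars.isdigit (PySem.Chars.strip l)
      = List.filter PySem.Chars.isdigit l := by
  unfold PySem.Chars.strip PySem.Chars.rstrip PySem.Chars.lstrip
  rw [List.filter_reverse, pvFilter_dropWhile _ _ pvIsdigit_of_isspace,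
      List.filter_reverse, List.reverse_reverse,
      pvFilter_dropWhile _ _ pvIsdigit_of_isspace]

-- dropping a "TDC-" prefix does not change the digit subsequence
theorem pvFilter_tdc (rest : List Char) :
    List.filter PySem.Chars.isdigit ('T' :: 'D' :: 'C' :: '-' :: rest)
      = List.filter PySem.Chars.isdigit rest := by
  have hT : PySem.Chars.isdigit 'T' = false := by decide
  have hD : PySem.Chars.isdigit 'D' = false := by decide
  have hC : PySem.Chars.isdigit 'C' = false := by decide
  have hm : PySem.Chars.isdigit '-' = false := by decide
  simp [hT, hD, hC, hm]

-- loop characterisation: collects the first (4 - |buf|) digits of l after buf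
theorem pvAltLoop_eq (l : List Char) (buf : List Char) (h : buf.length < 4) :
    pvAltLoop l buf = buf ++ (List.filter PySem.Chars.isdigit l).take (4 - buf.length) := by
  induction l generalizing buf with
  | nil => simp [pvAltLoop]
  | cons c l ih =>
    unfold pvAltLoop
    by_cases hc : PySem.Chars.isdigit c = true
    · simp only [hc, if_true, List.filter_cons]
      by_cases h4 : (buf ++ [c]).length = 4
      · simp only [h4, if_true]
        have : 4 - buf.length = 1 := by simp at h4; omega
        simp [this]
      · simp only [h4, if_false]
        rw [ih (buf ++ [c]) (by simp at h4 ⊢; omega)]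
        have : 4 - buf.length = (4 - (buf ++ [c]).length) + 1 := by
          simp at h4 ⊢; omega
        simp [this, List.take_succ_cons, List.append_assoc]
    · simp only [Bool.not_eq_true] at hc
      simp [hc, ih buf h]

-- final-step equality on the digit list
theorem pvTail_eq (d : List Char) (_hd : d ≠ []) :
    PySem.Chars.zfill (d.drop (d.length - 4)) 4
      = PySem.List.slice (PySem.Chars.zfill d 4) (some (-4)) none := by
  rw [PySem.List.slice_from_neg_ofNat _ 4 (by omega)]
  rw [PySem.Chars.length_zfill]
  by_cases h : 4 ≤ d.length
  · have hz : PySem.Chars.zfill d 4 = d := by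
      unfold PySem.Chars.zfill
      rw [if_pos (by exact_mod_cast h)]
    rw [hz]
    have hlen : (d.drop (d.length - 4)).length = 4 := by
      rw [List.length_drop]; omega
    have : PySem.Chars.zfill (d.drop (d.length - 4)) 4 = d.drop (d.length - 4) := by
      unfold PySem.Chars.zfill
      rw [if_pos (by rw [hlen]; norm_num)]
    rw [this]
    have ht4 : (Int.toNat 4) = 4 := rfl
    rw [ht4]
    congr 1
    omega
  · have h1 : d.length - 4 = 0 := by omega
    have ht4 : (Int.toNat 4) = 4 := rfl
    have h2 : max d.length (Int.toNat 4) - 4 = 0 := by rw [ht4]; omega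
    rw [h1, h2, List.drop_zero, List.drop_zero]

theorem pvTake4_nil_iff (d : List Char) : (d.reverse.take 4 = []) ↔ d = [] := by
  rw [List.take_eq_nil_iff]
  simp

-- ===== VERDICT (by name: the statement is the Claim_ definition above) =====
set_option maxHeartbeats 1000000 in
theorem normalize_consecutive_4_py_spec : Claim_equal_normalize_consecutive_4_py := by
  intro value _
  unfold Spec_normalize_consecutive_4_py
  unfold normalize_consecutive_4_py normalize_consecutive_4_py_alt normalize_upper_py
  -- name the digit list of the raw input
  set d := List.filter PySem.Chars.isdigit value.toList with hdDef
  -- A's filtered digits are exactly d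
  have hsrc : ∀ s : String,
      (if PySem.Str.startswith s "TDC-" then PySem.Str.slice s (some 4) none else s).toList.filter
        PySem.Chars.isdigit = s.toList.filter PySem.Chars.isdigit := by
    intro s
    by_cases hp : PySem.Str.startswith s "TDC-" = true
    · rw [if_pos hp]
      unfold PySem.Str.startswith at hp
      rw [PySem.Chars.startswith_iff] at hp
      obtain ⟨rest, hr⟩ := hp
      have hr' : s.toList = 'T' :: 'D' :: 'C' :: '-' :: rest := by
        rw [← hr]; rfl
      have hslice : (PySem.Str.slice s (some 4) none).toList = s.toList.drop 4 := by
        rw [PySem.Str.toList_slice, PySem.Chars.slice_eq_listSlice,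
            PySem.List.slice_from _ (by omega)]
        rfl
      rw [hslice, hr', pvFilter_tdc]
      rfl
    · rw [if_neg hp]
  have hA : (if PySem.Str.startswith (PySem.Str.upper (PySem.Str.strip value)) "TDC-" then
        PySem.Str.slice (PySem.Str.upper (PySem.Str.strip value)) (some 4) none
      else PySem.Str.upper (PySem.Str.strip value)).toList.filter PySem.Chars.isdigit = d := by
    rw [hsrc]
    rw [PySem.Str.toList_upper, PySem.Str.toList_strip, pvFilter_upper, pvFilter_strip]
  -- B's buffer is the last ≤4 digits, reversed
  have hbuf : pvAltLoop value.toList.reverse [] = d.reverse.take 4 := by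
    rw [pvAltLoop_eq _ [] (by simp)]
    simp [List.filter_reverse, hdDef]
  simp only [hA, hbuf, String.toList_ofList]
  by_cases hnil : d = []
  · simp [hnil]
  · rw [if_neg hnil, if_neg (by rw [pvTake4_nil_iff]; exact hnil)]
    unfold PySem.Str.slice PySem.Str.zfill
    refine congrArg String.ofList ?_
    rw [String.toList_ofList, String.toList_ofList, PySem.Chars.slice_eq_listSlice,
        List.reverse_take, List.reverse_reverse, List.length_reverse]
    simp only [String.toList_ofList]
    exact (pvTail_eq d hnil).symm
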